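-- pv_equiv track=rewrite | github.com/Association-Rezel/sadh | back/back/core/dolibarr.py | _name_variants
-- ===== SOURCE A (Python) =====
-- def _name_variants(first_name: str, last_name: str) -> list[tuple[str, str]]:
--     """variantes des noms pour essayer de matcher dans Dolibarr - à terme clé primaire = user authentik je crois -"""
--     seen: set[tuple[str, str]] = set()
--     result: list[tuple[str, str]] = []
--     for fn, ln in [(first_name, last_name), (last_name, first_name)]:
--         for f, n in [
--             (fn, ln),
--             (fn.capitalize(), ln.capitalize()),
--             (fn.upper(), ln.upper()),
--             (fn.lower(), ln.lower()),
--         ]: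
--             if (f, n) not in seen:
--                 seen.add((f, n))
--                 result.append((f, n))
--     return result
-- ===== SOURCE B (Python) =====
-- def _name_variants(first_name: str, last_name: str) -> list[tuple[str, str]]:
--     def casings(fn: str, ln: str) -> list[tuple[str, str]]:
--         return [
--             (fn, ln),
--             (fn.capitalize(), ln.capitalize()),
--             (fn.upper(), ln.upper()),
--             (fn.lower(), ln.lower()),
--         ]
--
--     def uniq(pairs: list[tuple[str, str]]) -> list[tuple[str, str]]:
--         # keep the head, recurse on the tail with every copy of the head filtered out
--         if not pairs:
--             return []
--         head = pairs[0]
--         return [head] + uniq([p for p in pairs[1:] if p != head])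
--
--     return uniq(casings(first_name, last_name) + casings(last_name, first_name))
-- ===== Notes on version B (the rewrite author's own statement) =====
-- stated objective: alternative
-- what changed: B has no seen-set and no membership state at all: it concatenates the two casing lists and deduplicates by structural recursion, keeping the head and filtering every later copy of it out of the tail before recursing.
import Mathlib
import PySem

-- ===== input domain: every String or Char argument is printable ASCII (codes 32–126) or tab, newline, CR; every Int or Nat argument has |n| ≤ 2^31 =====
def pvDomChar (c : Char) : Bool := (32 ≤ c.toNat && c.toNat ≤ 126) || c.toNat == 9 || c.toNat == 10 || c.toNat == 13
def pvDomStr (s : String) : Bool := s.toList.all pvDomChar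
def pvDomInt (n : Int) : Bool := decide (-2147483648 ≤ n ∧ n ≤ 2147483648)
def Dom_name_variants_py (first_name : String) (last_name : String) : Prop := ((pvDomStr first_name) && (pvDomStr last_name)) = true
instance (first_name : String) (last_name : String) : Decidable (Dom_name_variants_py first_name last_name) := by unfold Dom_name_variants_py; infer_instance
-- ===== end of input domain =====

-- B drops A's seen-set/result state entirely: it concatenates the two casing lists and
-- deduplicates by structural recursion (keep the head, filter its copies out of the tail).

-- str.capitalize(): first char upper-cased, the rest lower-cased — exact on the ASCII domain
-- (PySem has no capitalize primitive, so it is ported by hand, step for step).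
def pvCapitalize (s : String) : String :=
  match s.toList with
  | [] => ""
  | c :: rest => String.ofList (PySem.Chars.upperChar c :: PySem.Chars.lower rest)

-- the four casings of a (fn, ln) pair — the inner literal list both Pythons write
def pvCasings (fn ln : String) : List (String × String) :=
  [(fn, ln),
   (pvCapitalize fn, pvCapitalize ln),
   (PySem.Str.upper fn, PySem.Str.upper ln),
   (PySem.Str.lower fn, PySem.Str.lower ln)]

-- ===== PORT A =====
-- seen/result loop: for each candidate, if not in seen then add to seen and append to result
def name_variants_py (first_name : String) (last_name : String) : List (String × String) :=
  let step := fun (st : PySem.Set (String × String) × List (String × String)) (p : String × String) =>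
    if PySem.Set.contains st.1 p then st else (PySem.Set.add st.1 p, st.2 ++ [p])
  ([(first_name, last_name), (last_name, first_name)].foldl
    (fun st fl => (pvCasings fl.1 fl.2).foldl step st)
    (PySem.Set.empty, [])).2

-- ===== PORT B =====
-- uniq(pairs): if empty, []; else [head] + uniq([p for p in tail if p != head])
def pvUniq : List (String × String) → List (String × String)
  | [] => []
  | h :: t => h :: pvUniq (t.filter (fun p => p != h))
termination_by l => l.length
decreasing_by simp only [List.length_cons, List.length_unattach]; exact Nat.lt_succ_of_le (le_trans (List.length_filter_le _ _) (by simp))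

def name_variants_py_alt (first_name : String) (last_name : String) : List (String × String) :=
  pvUniq (pvCasings first_name last_name ++ pvCasings last_name first_name)

-- ===== PRECONDITION & SPEC =====
def Spec_name_variants_py (first_name : String) (last_name : String) (out : List (String × String)) : Prop := out = name_variants_py_alt first_name last_name
instance (first_name : String) (last_name : String) (out : List (String × String)) : Decidable (Spec_name_variants_py first_name last_name out) := by unfold Spec_name_variants_py; infer_instance

-- ===== CLAIM (what is proved, stated in full; the proofs are below) =====
def Claim_equal_name_variants_py : Prop := ∀ (first_name : String) (last_name : String), Dom_name_variants_py first_name last_name → Spec_name_variants_py first_name last_name (name_variants_py first_name last_name)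

-- ===== LEMMAS AND PROOFS =====

-- the two defining equations of pvUniq, restated for rewriting past the
-- well-founded-recursion encoding
theorem pvUniq_nil : pvUniq [] = [] := by rw [pvUniq]
theorem pvUniq_cons (h : String × String) (t : List (String × String)) :
    pvUniq (h :: t) = h :: pvUniq (t.filter (fun p => p != h)) := by rw [pvUniq]

-- A's (seen, result) fold keeps seen = result, and both equal the running Set.add fold.
theorem pv_fold_step_eq (cs : List (String × String)) (r : List (String × String)) :
    cs.foldl
      (fun (st : PySem.Set (String × String) × List (String × String)) (p : String × String) =>
        if PySem.Set.contains st.1 p then st else (PySem.Set.add st.1 p, st.2 ++ [p]))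
      (r, r)
    = (cs.foldl PySem.Set.add r, cs.foldl PySem.Set.add r) := by
  induction cs generalizing r with
  | nil => rfl
  | cons c cs ih =>
    simp only [List.foldl_cons]
    by_cases h : c ∈ r
    · simpa [PySem.Set.add, PySem.Set.contains, h] using ih r
    · simpa [PySem.Set.add, PySem.Set.contains, h] using ih (r ++ [c])

-- the Set.add fold equals the already-seen prefix plus B's head-and-filter recursion
-- on the not-yet-seen candidates.
theorem pv_foldl_add_eq_uniq (cs : List (String × String)) (r : List (String × String)) :
    cs.foldl PySem.Set.add r = r ++ pvUniq (cs.filter (fun p => !(decide (p ∈ r)))) := by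
  induction cs generalizing r with
  | nil => simp [pvUniq_nil]
  | cons c cs ih =>
    simp only [List.foldl_cons, List.filter_cons]
    by_cases h : c ∈ r
    · simpa [PySem.Set.add, PySem.Set.contains, h] using ih r
    · have hf : cs.filter (fun p => !(decide (p ∈ r ++ [c])))
          = (cs.filter (fun p => !(decide (p ∈ r)))).filter (fun p => p != c) := by
        rw [List.filter_filter]
        apply List.filter_congr
        intro p _
        by_cases hp : p = c <;> by_cases hr : p ∈ r <;> simp [hp, hr]
      have hstep := ih (r ++ [c])
      rw [hf] at hstep
      simp only [PySem.Set.add, PySem.Set.contains, List.contains_eq_mem, h, decide_false,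
        Bool.false_eq_true, if_false, Bool.not_false, if_true]
      rw [hstep, pvUniq_cons]
      simp

-- ===== VERDICT (by name: the statement is the Claim_ definition above) =====
theorem name_variants_py_spec : Claim_equal_name_variants_py := by
  intro f l _
  unfold Spec_name_variants_py name_variants_py name_variants_py_alt
  simp only [List.foldl_cons, List.foldl_nil]
  rw [show (PySem.Set.empty : PySem.Set (String × String)) = ([] : List (String × String)) from rfl]
  rw [pv_fold_step_eq, pv_fold_step_eq, ← List.foldl_append, pv_foldl_add_eq_uniq]
  simp
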